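-- pv_equiv track=rewrite | github.com/utk-eecs-crumpton-tas/cs102lings | scripts/tests_lib/testing.py | remove_nested_commas
-- ===== SOURCE A (Python) =====
-- def remove_nested_commas(text: str):
--     """
--     Remove commas inside parentheses or braces.
--     Assumes balanced and matching parentheses and braces.
--     """
--     depth = 0
--     result = ""
--     for character in text:
--         match character:
--             case "(" | "{":
--                 depth += 1
--             case ")" | "}":
--                 depth -= 1
--             case ",":
--                 if depth != 0:
--                     continue
--         result += character
--
--     assert depth == 0, "Unbalanced parentheses or braces"
--     return result
-- ===== SOURCE B (Python) =====
-- def remove_nested_commas(text: str):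
--     """
--     Remove commas inside parentheses or braces.
--     Assumes balanced and matching parentheses and braces.
--     """
--     delta = {"(": 1, "{": 1, ")": -1, "}": -1}
--     depths = []
--     d = 0
--     for character in text:
--         d += delta.get(character, 0)
--         depths.append(d)
--     result = "".join(
--         c for c, dep in zip(text, depths) if not (c == "," and dep != 0)
--     )
--     assert d == 0, "Unbalanced parentheses or braces"
--     return result
-- ===== Notes on version B (the rewrite author's own statement) =====
-- stated objective: alternative
-- what changed: Replaces the interleaved depth-track-and-append loop with a table-first pass: a delta table builds the cumulative-depth list, then a single filtering join drops commas at non-zero depth.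
import Mathlib
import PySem

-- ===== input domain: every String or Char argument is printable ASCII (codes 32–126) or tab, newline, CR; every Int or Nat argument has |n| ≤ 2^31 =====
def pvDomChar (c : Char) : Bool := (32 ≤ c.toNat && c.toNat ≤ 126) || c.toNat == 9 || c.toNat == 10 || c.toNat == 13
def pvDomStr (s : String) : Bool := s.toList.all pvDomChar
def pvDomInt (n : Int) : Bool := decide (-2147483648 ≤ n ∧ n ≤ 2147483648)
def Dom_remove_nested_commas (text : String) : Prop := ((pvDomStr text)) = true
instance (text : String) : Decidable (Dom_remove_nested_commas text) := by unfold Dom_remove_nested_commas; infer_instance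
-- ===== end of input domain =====

-- B replaces A's interleaved depth-track-and-append loop with a table-first pass (cumulative-depth list)
-- followed by a single filtering join; objective: alternative decomposition, same cost.


-- ===== PORT A =====
-- A's loop: one pass carrying (depth, result); the final assert is excluded by Pre_.
def remove_nested_commas (text : String) : String :=
  let st := text.toList.foldl (fun (st : Int × List Char) c =>
    if c = '(' ∨ c = '{' then (st.1 + 1, st.2 ++ [c])
    else if c = ')' ∨ c = '}' then (st.1 - 1, st.2 ++ [c])
    else if c = ',' then (if st.1 ≠ 0 then st else (st.1, st.2 ++ [c]))
    else (st.1, st.2 ++ [c])) (0, [])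
  String.mk st.2

-- ===== PORT B =====
-- B's delta table as a function of the character (dict.get with default 0).
def pvDelta (c : Char) : Int :=
  (PySem.Dict.getD (PySem.Dict.ofList [('(', (1:Int)), ('{', 1), (')', -1), ('}', -1)]) c 0)

-- B's first pass: build the cumulative-depth list (and the final depth d).
def pvDepths (text : String) : Int × List Int :=
  text.toList.foldl (fun (st : Int × List Int) c =>
    (st.1 + pvDelta c, st.2 ++ [st.1 + pvDelta c])) (0, [])

def remove_nested_commas_alt (text : String) : String :=
  let st := pvDepths text
  String.mk (((text.toList.zip st.2).filter
    (fun p => ¬ (p.1 = ',' ∧ p.2 ≠ 0))).map Prod.fst)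

-- ===== PRECONDITION & SPEC =====
-- Pre_ excludes exactly the unbalanced inputs on which A's final assert raises AssertionError
-- (B's assert raises there too).
def Pre_remove_nested_commas (text : String) : Prop :=
  (text.toList.count '(' : Int) + text.toList.count '{'
    = (text.toList.count ')' : Int) + text.toList.count '}'
instance (text : String) : Decidable (Pre_remove_nested_commas text) := by
  unfold Pre_remove_nested_commas; infer_instance

def pvWitness_remove_nested_commas : String := "a,(b,c),{d,e}"

def Spec_remove_nested_commas (text : String) (out : String) : Prop := out = remove_nested_commas_alt text
instance (text : String) (out : String) : Decidable (Spec_remove_nested_commas text out) := by unfold Spec_remove_nested_commas; infer_instance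

-- ===== CLAIM (what is proved, stated in full; the proofs are below) =====
def Claim_equal_remove_nested_commas : Prop := ∀ (text : String), Dom_remove_nested_commas text → Pre_remove_nested_commas text → Spec_remove_nested_commas text (remove_nested_commas text)

-- ===== LEMMAS AND PROOFS =====

-- common recursive description of the kept characters, starting from depth d
def pvSpecList (d : Int) : List Char → List Char
  | [] => []
  | c :: cs =>
      let d' := d + pvDelta c
      (if c = ',' ∧ d' ≠ 0 then [] else [c]) ++ pvSpecList d' cs

-- the recursive description of B's depth list from starting depth d
def pvDepthList (d : Int) : List Char → List Int
  | [] => []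
  | c :: cs => (d + pvDelta c) :: pvDepthList (d + pvDelta c) cs

lemma pvDelta_eval (c : Char) :
    pvDelta c = (if c = '(' ∨ c = '{' then 1 else if c = ')' ∨ c = '}' then -1 else 0) := by
  by_cases h1 : c = '(' 
  · subst h1; decide
  by_cases h2 : c = '{'
  · subst h2; decide
  by_cases h3 : c = ')'
  · subst h3; decide
  by_cases h4 : c = '}'
  · subst h4; decide
  have e1 : ('(' == c) = false := by simp [Ne.symm h1]
  have e2 : ('{' == c) = false := by simp [Ne.symm h2]
  have e3 : (')' == c) = false := by simp [Ne.symm h3]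
  have e4 : ('}' == c) = false := by simp [Ne.symm h4]
  simp [pvDelta, PySem.Dict.getD, PySem.Dict.get?, PySem.Dict.ofList, PySem.Dict.empty,
    PySem.Dict.update, PySem.Dict.insert, List.find?, e1, e2, e3, e4,
    h1, h2, h3, h4]

lemma portA_foldl (l : List Char) (d : Int) (r : List Char) :
    l.foldl (fun (st : Int × List Char) c =>
      if c = '(' ∨ c = '{' then (st.1 + 1, st.2 ++ [c])
      else if c = ')' ∨ c = '}' then (st.1 - 1, st.2 ++ [c])
      else if c = ',' then (if st.1 ≠ 0 then st else (st.1, st.2 ++ [c]))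
      else (st.1, st.2 ++ [c])) (d, r)
    = (d + (l.map pvDelta).sum, r ++ pvSpecList d l) := by
  induction l generalizing d r with
  | nil => simp [pvSpecList]
  | cons c cs ih =>
    have hd := pvDelta_eval c
    by_cases h1 : c = '(' ∨ c = '{'
    · have hc : ¬ (c = ',') := by rcases h1 with h | h <;> simp [h]
      simp only [List.foldl_cons, List.map_cons, List.sum_cons, if_pos h1, ih,
        Prod.mk.injEq]
      constructor
      · rw [hd]; simp [h1]; ring
      · simp only [pvSpecList, hd, if_pos h1, List.append_assoc]
        simp [hc]
    · by_cases h2 : c = ')' ∨ c = '}'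
      · have hc : ¬ (c = ',') := by rcases h2 with h | h <;> simp [h]
        simp only [List.foldl_cons, List.map_cons, List.sum_cons, if_neg h1, if_pos h2, ih,
          Prod.mk.injEq]
        constructor
        · rw [hd]; simp [h1, h2]; ring
        · simp only [pvSpecList, hd, if_neg h1, if_pos h2, List.append_assoc]
          have : d - 1 = d + -1 := by ring
          simp [hc, this]
      · have hdz : pvDelta c = 0 := by rw [hd]; simp [h1, h2]
        by_cases h3 : c = ','
        · by_cases h4 : d ≠ 0
          · simp only [List.foldl_cons, List.map_cons, List.sum_cons, if_neg h1, if_neg h2,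
              if_pos h3, if_pos h4, ih, Prod.mk.injEq]
            constructor
            · rw [hdz]; ring
            · subst h3
              have hz : pvDelta ',' = 0 := by decide
              simp [pvSpecList, hz, h4]
          · simp only [List.foldl_cons, List.map_cons, List.sum_cons, if_neg h1, if_neg h2,
              if_pos h3, if_neg h4, ih, Prod.mk.injEq]
            constructor
            · rw [hdz]; ring
            · subst h3
              have hz : pvDelta ',' = 0 := by decide
              simp [pvSpecList, hz, not_not.mp h4]
        · simp only [List.foldl_cons, List.map_cons, List.sum_cons, if_neg h1, if_neg h2,
            if_neg h3, ih, Prod.mk.injEq]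
          constructor
          · rw [hdz]; ring
          · simp [pvSpecList, hdz, h3]

lemma portB_foldl (l : List Char) (d : Int) (r : List Int) :
    l.foldl (fun (st : Int × List Int) c =>
      (st.1 + pvDelta c, st.2 ++ [st.1 + pvDelta c])) (d, r)
    = (d + (l.map pvDelta).sum, r ++ pvDepthList d l) := by
  induction l generalizing d r with
  | nil => simp [pvDepthList]
  | cons c cs ih =>
    simp only [List.foldl_cons, List.map_cons, List.sum_cons, ih, pvDepthList, Prod.mk.injEq]
    constructor
    · ring
    · simp

lemma filter_zip_depthList (l : List Char) (d : Int) :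
    ((l.zip (pvDepthList d l)).filter
      (fun p => ¬ (p.1 = ',' ∧ p.2 ≠ 0))).map Prod.fst = pvSpecList d l := by
  induction l generalizing d with
  | nil => simp [pvDepthList, pvSpecList]
  | cons c cs ih =>
    simp only [pvDepthList, pvSpecList, List.zip_cons_cons, List.filter_cons]
    by_cases hc : c = ','
    · subst hc
      have hz : pvDelta ',' = 0 := by decide
      rw [hz, add_zero]
      by_cases h0 : d = 0
      · subst h0
        simpa using ih 0
      · simpa [h0] using ih d
    · simpa [hc] using ih (d + pvDelta c)

-- ===== VERDICT (by name: the statement is the Claim_ definition above) =====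
theorem remove_nested_commas_spec : Claim_equal_remove_nested_commas := by
  intro text _ _
  unfold Spec_remove_nested_commas remove_nested_commas remove_nested_commas_alt pvDepths
  rw [portA_foldl, portB_foldl]
  simp only [List.nil_append]
  rw [filter_zip_depthList]
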